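-- pv_equiv track=rewrite | github.com/Majed-Alsho/EAA-Embedded-Ai-Assistant- | eaa_v4/smart_edit.py | strip_whitespace_blocks
-- ===== SOURCE A (Python) =====
-- def strip_whitespace_blocks(text: str) -> str:
--     """Strip leading/trailing blank lines and common indentation for matching."""
--     lines = text.split("\n")
--     # Strip leading blank lines
--     while lines and not lines[0].strip():
--         lines.pop(0)
--     # Strip trailing blank lines
--     while lines and not lines[-1].strip():
--         lines.pop()
--     # Dedent (remove common leading whitespace)
--     if lines:
--         min_indent = min(
--             len(line) - len(line.lstrip())
--             for line in lines
--             if line.strip()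
--         )
--         lines = [line[min_indent:] if len(line) >= min_indent else line for line in lines]
--     return "\n".join(lines)
-- ===== SOURCE B (Python) =====
-- def strip_whitespace_blocks(text: str) -> str:
--     """Strip leading/trailing blank lines and common indentation for matching."""
--     lines = text.split("\n")
--     # One fused pass: find first/last non-blank line and the minimal indent.
--     first = last = -1
--     min_indent = None
--     for i, line in enumerate(lines):
--         if line.strip():
--             if first < 0:
--                 first = i
--             last = i
--             ind = len(line) - len(line.lstrip())
--             if min_indent is None or ind < min_indent:
--                 min_indent = ind
--     if first < 0:
--         return ""
--     return "\n".join(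
--         line[min_indent:] if len(line) >= min_indent else line
--         for line in lines[first:last + 1]
--     )
-- ===== Notes on version B (the rewrite author's own statement) =====
-- stated objective: alternative
-- what changed: A trims with two repeated-pop while-loops and then a separate min() pass over the trimmed lines; B makes one fused pass over enumerate(lines) computing (first, last, min_indent) and produces the trimmed block with a single slice lines[first:last+1].
import Mathlib
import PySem

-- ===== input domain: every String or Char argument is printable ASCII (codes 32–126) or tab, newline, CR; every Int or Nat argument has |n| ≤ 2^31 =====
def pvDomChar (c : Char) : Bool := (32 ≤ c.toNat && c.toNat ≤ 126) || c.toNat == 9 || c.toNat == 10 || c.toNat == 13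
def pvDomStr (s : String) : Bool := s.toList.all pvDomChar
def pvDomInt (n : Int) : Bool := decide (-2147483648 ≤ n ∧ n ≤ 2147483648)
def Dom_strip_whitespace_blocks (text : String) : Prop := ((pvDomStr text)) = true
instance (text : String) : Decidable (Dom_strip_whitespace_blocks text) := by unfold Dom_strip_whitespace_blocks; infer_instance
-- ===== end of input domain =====

-- B replaces A's two repeated-pop trimming loops and separate min pass by ONE fused pass
-- computing (first, last, min_indent), then a single slice (objective: alternative decomposition).

-- ===== PORT A =====

-- 'not line.strip()'  (empty string is falsy)
def pvBlank (l : List Char) : Bool := (PySem.Chars.strip l).isEmpty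

-- 'len(line) - len(line.lstrip())'
def pvIndent (l : List Char) : Nat := l.length - (PySem.Chars.lstrip l).length

-- 'while lines and not lines[0].strip(): lines.pop(0)'
def pvPopFront : List (List Char) → List (List Char)
  | [] => []
  | l :: ls => if pvBlank l then pvPopFront ls else l :: ls

-- 'while lines and not lines[-1].strip(): lines.pop()'
def pvPopBack (ls : List (List Char)) : List (List Char) :=
  match h : ls.getLast? with
  | none => ls
  | some l => if pvBlank l then pvPopBack ls.dropLast else ls
termination_by ls.length
decreasing_by
  have : ls ≠ [] := by intro he; simp [he] at h
  cases ls with | nil => exact absurd rfl this | cons a t => simp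

-- 'line[min_indent:] if len(line) >= min_indent else line'
def pvDedent (m : Nat) (l : List Char) : List Char :=
  if l.length ≥ m then PySem.List.slice l (some (m : Int)) none else l

def strip_whitespace_blocks (text : String) : String :=
  let lines := PySem.Chars.splitOn text.toList ['\n']
  let lines := pvPopFront lines
  let lines := pvPopBack lines
  let lines :=
    if lines.isEmpty then lines
    else
      -- the generator is nonempty whenever this branch runs (lines[0] is non-blank),
      -- so Python's min never raises; the .getD 0 default is unreachable
      let min_indent :=
        (PySem.List.min? ((lines.filter (fun l => !pvBlank l)).map pvIndent) id).getD 0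
      lines.map (pvDedent min_indent)
  String.ofList (PySem.Chars.join ['\n'] lines)

-- ===== PORT B =====

-- the body of B's for-loop over enumerate(lines); state = (first, last, min_indent)
def pvStep (s : Int × Int × Option Nat) (p : Int × List Char) : Int × Int × Option Nat :=
  if !pvBlank p.2 then
    let first := if s.1 < 0 then p.1 else s.1
    let ind := pvIndent p.2
    let mi := match s.2.2 with
      | none => some ind
      | some m => if ind < m then some ind else some m
    (first, p.1, mi)
  else s

def strip_whitespace_blocks_alt (text : String) : String :=
  let lines := PySem.Chars.splitOn text.toList ['\n']
  let st := (PySem.List.enumerate lines).foldl pvStep (-1, -1, none)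
  if st.1 < 0 then ""
  else
    -- min_indent is an int here (first ≥ 0 forces it set); .getD 0 is unreachable
    let m := st.2.2.getD 0
    String.ofList (PySem.Chars.join ['\n']
      ((PySem.List.slice lines (some st.1) (some (st.2.1 + 1))).map (pvDedent m)))

-- ===== PRECONDITION & SPEC =====
def Spec_strip_whitespace_blocks (text : String) (out : String) : Prop := out = strip_whitespace_blocks_alt text
instance (text : String) (out : String) : Decidable (Spec_strip_whitespace_blocks text out) := by unfold Spec_strip_whitespace_blocks; infer_instance

-- ===== CLAIM (what is proved, stated in full; the proofs are below) =====
def Claim_equal_strip_whitespace_blocks : Prop := ∀ (text : String), Dom_strip_whitespace_blocks text → Spec_strip_whitespace_blocks text (strip_whitespace_blocks text)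

-- ===== LEMMAS AND PROOFS =====

-- helper functions used only by the proofs: closed forms of the two trimming loops / of B's fold state
def pvFirstI (M : List (List Char)) : Int :=
  if M.all pvBlank then -1 else ((M.takeWhile pvBlank).length : Int)

def pvLastI (M : List (List Char)) : Int :=
  if M.all pvBlank then -1 else (M.length : Int) - 1 - ((M.reverse.takeWhile pvBlank).length : Int)

def pvMinI (M : List (List Char)) : Option Nat :=
  PySem.List.min? ((M.filter (fun l => !pvBlank l)).map pvIndent) id

theorem pvPopFront_eq (L : List (List Char)) : pvPopFront L = L.dropWhile pvBlank := by
  induction L with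
  | nil => rfl
  | cons a t ih => by_cases h : pvBlank a <;> simp [pvPopFront, h, ih]

theorem pvPopBack_rev (R : List (List Char)) :
    pvPopBack R.reverse = (R.dropWhile pvBlank).reverse := by
  induction R with
  | nil => simp [pvPopBack]
  | cons a t ih =>
    rw [List.reverse_cons, pvPopBack]
    split
    next heq => simp at heq
    next l heq =>
      rw [List.getLast?_concat, Option.some_inj] at heq
      subst heq
      rw [List.dropLast_concat]
      by_cases h : pvBlank a <;> simp [h, ih]

theorem pvPopBack_eq (L : List (List Char)) :
    pvPopBack L = (L.reverse.dropWhile pvBlank).reverse := by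
  simpa using pvPopBack_rev L.reverse

theorem pvDropWhile_eq_drop {α : Type} (p : α → Bool) (l : List α) :
    l.dropWhile p = l.drop (l.takeWhile p).length := by
  induction l with
  | nil => rfl
  | cons a t ih =>
    by_cases h : p a <;> simp [h, ih]

theorem pvTakeWhile_lt {α : Type} {p : α → Bool} {l : List α} (h : ¬ ∀ a ∈ l, p a = true) :
    (l.takeWhile p).length < l.length := by
  rcases lt_or_eq_of_le (List.takeWhile_prefix (l := l) (p := p)).length_le with hlt | heq
  · exact hlt
  · exact absurd (List.takeWhile_eq_self_iff.1
      ((List.takeWhile_prefix (l := l) (p := p)).eq_of_length heq)) h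

theorem pvMin?_concat_none (ys : List Nat) (k : Nat)
    (h : PySem.List.min? ys id = none) :
    PySem.List.min? (ys ++ [k]) id = some k := by
  rw [PySem.List.min?] at h ⊢
  rw [List.foldl_append, h]
  rfl

theorem pvMin?_concat_some (ys : List Nat) (k m : Nat)
    (h : PySem.List.min? ys id = some m) :
    PySem.List.min? (ys ++ [k]) id = if k < m then some k else some m := by
  rw [PySem.List.min?] at h ⊢
  rw [List.foldl_append, h]
  simp

theorem pvFoldl_enum (M : List (List Char)) :
    (PySem.List.enumerate M).foldl pvStep (-1, -1, none) = (pvFirstI M, pvLastI M, pvMinI M) := by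
  induction M using List.reverseRecOn with
  | nil =>
    simp [PySem.List.enumerate_nil, pvFirstI, pvLastI, pvMinI, PySem.List.min?]
  | append_singleton N x ih =>
    rw [PySem.List.enumerate_append, List.foldl_append, ih]
    rw [PySem.List.enumerate_cons, PySem.List.enumerate_nil]
    by_cases hx : pvBlank x
    · -- blank line: the state is unchanged, and so are all three closed forms
      by_cases hall : N.all pvBlank
      · simp [pvStep, hx, pvFirstI, pvLastI, pvMinI, List.all_append, hall]
      · have hlt : ((N.takeWhile pvBlank).length : Nat) < N.length :=
          pvTakeWhile_lt (by simpa [List.all_eq_true] using hall)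
        simp [pvStep, hx, pvFirstI, pvLastI, pvMinI, List.all_append, hall,
          List.takeWhile_append, Nat.ne_of_lt hlt]
        omega
    · -- non-blank line: first is set if unset, last becomes this index, min is updated
      have hfil : (N ++ [x]).filter (fun l => !pvBlank l) = N.filter (fun l => !pvBlank l) ++ [x] := by
        simp [List.filter_append, hx]
      by_cases hall : N.all pvBlank
      · have htw : N.takeWhile pvBlank = N :=
          List.takeWhile_eq_self_iff.2 (by simpa [List.all_eq_true] using hall)
        cases hmv : PySem.List.min? ((N.filter (fun l => !pvBlank l)).map pvIndent) id with
        | none =>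
          simp [pvStep, hx, pvFirstI, pvLastI, pvMinI, List.all_append, hall,
            List.takeWhile_append, htw, hfil, hmv, pvMin?_concat_none _ _ hmv]
        | some m =>
          simp [pvStep, hx, pvFirstI, pvLastI, pvMinI, List.all_append, hall,
            List.takeWhile_append, htw, hfil, hmv, pvMin?_concat_some _ _ _ hmv]
      · have hlt : ((N.takeWhile pvBlank).length : Nat) < N.length :=
          pvTakeWhile_lt (by simpa [List.all_eq_true] using hall)
        cases hmv : PySem.List.min? ((N.filter (fun l => !pvBlank l)).map pvIndent) id with
        | none =>
          simp [pvStep, hx, pvFirstI, pvLastI, pvMinI, List.all_append, hall,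
            List.takeWhile_append, Nat.ne_of_lt hlt, hfil, hmv, pvMin?_concat_none _ _ hmv]
        | some m =>
          simp [pvStep, hx, pvFirstI, pvLastI, pvMinI, List.all_append, hall,
            List.takeWhile_append, Nat.ne_of_lt hlt, hfil, hmv, pvMin?_concat_some _ _ _ hmv]

-- ===== VERDICT (by name: the statement is the Claim_ definition above) =====
theorem strip_whitespace_blocks_spec : Claim_equal_strip_whitespace_blocks := by
  intro text _
  unfold Spec_strip_whitespace_blocks
  simp only [strip_whitespace_blocks, strip_whitespace_blocks_alt]
  rw [pvFoldl_enum, pvPopFront_eq, pvPopBack_eq]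
  set L := PySem.Chars.splitOn text.toList ['\n'] with hLdef
  by_cases hall : L.all pvBlank
  · -- every line blank: A trims everything away and joins [], B returns "" directly
    have h1 : L.dropWhile pvBlank = [] :=
      List.dropWhile_eq_nil_iff.2 (by simpa [List.all_eq_true] using hall)
    simp [h1, pvFirstI, hall, PySem.Chars.join_nil]
  · -- some line is non-blank
    have hex : ¬ ∀ a ∈ L, pvBlank a = true := by simpa [List.all_eq_true] using hall
    set f := (L.takeWhile pvBlank).length with hf
    set D := L.dropWhile pvBlank with hD
    have hDdrop : D = L.drop f := pvDropWhile_eq_drop pvBlank L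
    have hsplit : L.takeWhile pvBlank ++ D = L := List.takeWhile_append_dropWhile
    have hDex : ¬ ∀ a ∈ D, pvBlank a = true := by
      intro hAllD
      refine hex (fun a ha => ?_)
      rw [← hsplit] at ha
      rcases List.mem_append.1 ha with h | h
      · exact List.mem_takeWhile_imp h
      · exact hAllD a h
    have hDrex : ¬ ∀ a ∈ D.reverse, pvBlank a = true := by
      simpa using hDex
    -- the trailing-blank run of L is exactly the trailing-blank run of D
    have hkey : L.reverse.takeWhile pvBlank = D.reverse.takeWhile pvBlank := by
      have : L.reverse = D.reverse ++ (L.takeWhile pvBlank).reverse := by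
        rw [← List.reverse_append, hsplit]
      rw [this, List.takeWhile_append,
        if_neg (Nat.ne_of_lt (pvTakeWhile_lt hDrex))]
    set r := (L.reverse.takeWhile pvBlank).length with hr
    have hrD : (D.reverse.takeWhile pvBlank).length = r := by rw [← hkey]
    have hrltD : r < D.length := by
      have := pvTakeWhile_lt hDrex
      simpa [hrD] using this
    have hfr : f + D.length = L.length := by
      have := congrArg List.length hsplit
      simpa using this
    -- A's trimmed list is B's slice
    have hT : (D.reverse.dropWhile pvBlank).reverse = D.take (D.length - r) := by
      rw [pvDropWhile_eq_drop, hrD, List.drop_reverse, List.reverse_reverse]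
    have hTapp : D = D.take (D.length - r) ++ (D.reverse.takeWhile pvBlank).reverse := by
      conv_lhs => rw [← List.reverse_reverse (as := D),
        ← List.takeWhile_append_dropWhile (p := pvBlank) (l := D.reverse)]
      rw [List.reverse_append, hT]
    have hfilter : (D.take (D.length - r)).filter (fun l => !pvBlank l)
        = L.filter (fun l => !pvBlank l) := by
      have h1 : (L.takeWhile pvBlank).filter (fun l => !pvBlank l) = [] :=
        List.filter_eq_nil_iff.2 (fun a ha => by simp [List.mem_takeWhile_imp ha])
      have h2 : ((D.reverse.takeWhile pvBlank).reverse).filter (fun l => !pvBlank l) = [] :=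
        List.filter_eq_nil_iff.2 (fun a ha => by
          simp [List.mem_takeWhile_imp (List.mem_reverse.1 ha)])
      conv_rhs => rw [← hsplit, List.filter_append, h1]
      conv_rhs => rw [hTapp, List.filter_append, h2]
      simp
    have hslice : PySem.List.slice L (some (pvFirstI L)) (some (pvLastI L + 1))
        = D.take (D.length - r) := by
      have h1 : pvFirstI L = (f : Int) := by
        simp only [pvFirstI, if_neg hall, hf]
      have h2 : pvLastI L + 1 = ((L.length - r : Nat) : Int) := by
        simp only [pvLastI, if_neg hall, ← hr]
        have : r ≤ L.length := by omega
        push_cast [this]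
        have : 1 ≤ L.length := by omega
        omega
      rw [h1, h2, PySem.List.slice_natCast, ← hDdrop]
      congr 1
      omega
    have hTne : ¬ (D.take (D.length - r)).isEmpty = true := by
      simp only [List.isEmpty_iff, List.take_eq_nil_iff]
      rintro (h | h)
      · omega
      · rw [h] at hrltD; simp at hrltD
    have hfirst : ¬ pvFirstI L < 0 := by
      simp [pvFirstI, hall]
    rw [hT, if_neg hTne, if_neg hfirst, hslice]
    have hmin : pvMinI L =
        PySem.List.min? (((D.take (D.length - r)).filter (fun l => !pvBlank l)).map pvIndent) id := by
      rw [pvMinI, hfilter]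
    rw [← hmin]
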